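-- pv_equiv track=rewrite | github.com/yashbalan/Final_Assignment | Q9.py | moveDups
-- ===== SOURCE A (Python) =====
-- def moveDups(s):
--     seen = set()
--     first_occurrence = []
--     duplicates = []
--
--     for char in s:
--         if char not in seen:
--             seen.add(char)
--             first_occurrence.append(char)
--         else:
--             duplicates.append(char)
--
--     if not duplicates:
--         return s
--     return ''.join(first_occurrence) + '_' + ''.join(duplicates)
-- ===== SOURCE B (Python) =====
-- def moveDups(s):
--     first = list(dict.fromkeys(s))
--     remaining = list(s)
--     for c in first:
--         remaining.remove(c)
--     if not remaining:
--         return s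
--     return ''.join(first) + '_' + ''.join(remaining)
-- ===== Notes on version B (the rewrite author's own statement) =====
-- stated objective: simpler
-- what changed: Replaces A's single classifying scan with seen-set bookkeeping by an order-preserving dedup (dict.fromkeys) followed by multiset subtraction (one remove per unique char) whose leftover is exactly the duplicates in appearance order.
import Mathlib
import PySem

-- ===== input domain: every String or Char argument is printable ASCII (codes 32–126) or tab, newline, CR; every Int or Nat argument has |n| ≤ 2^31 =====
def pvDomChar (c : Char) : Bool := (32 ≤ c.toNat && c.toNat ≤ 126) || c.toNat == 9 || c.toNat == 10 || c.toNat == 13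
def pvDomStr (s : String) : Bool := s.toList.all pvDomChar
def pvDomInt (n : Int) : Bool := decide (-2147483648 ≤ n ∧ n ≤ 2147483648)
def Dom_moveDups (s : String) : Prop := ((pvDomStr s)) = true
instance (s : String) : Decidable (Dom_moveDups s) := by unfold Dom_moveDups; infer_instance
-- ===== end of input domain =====

-- B rebuilds the answer as ordered dedup (dict.fromkeys) + one-remove-per-unique-char
-- multiset subtraction instead of A's single classifying scan; objective: simpler decomposition.

-- ===== PORT A =====
def moveDups (s : String) : String :=
  let st := s.toList.foldl
    (fun (st : PySem.Set Char × List Char × List Char) c =>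
      if (PySem.Set.contains st.1 c) = false then
        (PySem.Set.add st.1 c, st.2.1 ++ [c], st.2.2)
      else
        (st.1, st.2.1, st.2.2 ++ [c]))
    (PySem.Set.empty, [], [])
  if st.2.2 = [] then s
  else String.ofList st.2.1 ++ "_" ++ String.ofList st.2.2

-- ===== PORT B =====
def moveDups_alt (s : String) : String :=
  let first := PySem.List.dedup s.toList     -- list(dict.fromkeys(s))
  -- for c in first: remaining.remove(c); Option threads Python's ValueError (never hit here)
  match first.foldl (fun r? c => r?.bind (fun r => PySem.List.remove? r c)) (some s.toList) with
  | none => s   -- unreachable: each unique char is still present when its turn comes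
  | some remaining =>
      if remaining = [] then s
      else String.ofList first ++ "_" ++ String.ofList remaining

-- ===== PRECONDITION & SPEC =====
def Spec_moveDups (s : String) (out : String) : Prop := out = moveDups_alt s
instance (s : String) (out : String) : Decidable (Spec_moveDups s out) := by unfold Spec_moveDups; infer_instance

-- ===== CLAIM (what is proved, stated in full; the proofs are below) =====
def Claim_equal_moveDups : Prop := ∀ (s : String), Dom_moveDups s → Spec_moveDups s (moveDups s)

-- ===== LEMMAS AND PROOFS =====

-- first-occurrence chars of l, given already-seen chars S
def dedupS (S : List Char) : List Char → List Char
  | [] => []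
  | c :: t => if c ∈ S then dedupS S t else c :: dedupS (S ++ [c]) t

-- duplicate (already-seen) chars of l, in order, given already-seen chars S
def dupsS (S : List Char) : List Char → List Char
  | [] => []
  | c :: t => if c ∈ S then c :: dupsS S t else dupsS (S ++ [c]) t

lemma a_fold (l : List Char) : ∀ (S : PySem.Set Char) (f d : List Char),
    l.foldl
      (fun (st : PySem.Set Char × List Char × List Char) c =>
        if (PySem.Set.contains st.1 c) = false then
          (PySem.Set.add st.1 c, st.2.1 ++ [c], st.2.2)
        else
          (st.1, st.2.1, st.2.2 ++ [c]))
      (S, f, d)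
    = (PySem.Set.update S l, f ++ dedupS S l, d ++ dupsS S l) := by
  induction l with
  | nil => intro S f d; simp [dedupS, dupsS, PySem.Set.update_nil]
  | cons c t ih =>
      intro S f d
      by_cases h : c ∈ S
      · have hc : PySem.Set.contains S c = true := (PySem.Set.contains_iff S c).mpr h
        simp only [List.foldl, hc]
        rw [if_neg (by decide), ih, PySem.Set.update_cons, PySem.Set.add_of_mem h]
        simp [dedupS, dupsS, h, List.append_assoc]
      · have hc : PySem.Set.contains S c = false := by
          by_contra hcc
          simp only [Bool.not_eq_false] at hcc
          exact h ((PySem.Set.contains_iff S c).mp hcc)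
        simp only [List.foldl, hc]
        rw [ih, PySem.Set.update_cons, PySem.Set.add_of_not_mem h]
        simp [dedupS, dupsS, h, List.append_assoc]

lemma update_eq_dedupS (l : List Char) : ∀ S : PySem.Set Char,
    PySem.Set.update S l = S ++ dedupS S l := by
  induction l with
  | nil => intro S; simp [dedupS, PySem.Set.update_nil]
  | cons c t ih =>
      intro S
      by_cases h : c ∈ S
      · rw [PySem.Set.update_cons, PySem.Set.add_of_mem h, ih]
        simp [dedupS, h]
      · rw [PySem.Set.update_cons, PySem.Set.add_of_not_mem h, ih]
        simp [dedupS, h]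

lemma not_mem_dedupS (l : List Char) : ∀ (S : List Char) (x : Char),
    x ∈ dedupS S l → x ∉ S := by
  induction l with
  | nil => intro S x hx; simp [dedupS] at hx
  | cons c t ih =>
      intro S x hx
      by_cases h : c ∈ S
      · simp only [dedupS, if_pos h] at hx
        exact ih S x hx
      · simp only [dedupS, if_neg h, List.mem_cons] at hx
        rcases hx with rfl | hx
        · exact h
        · intro hxS
          exact ih (S ++ [c]) x hx (List.mem_append_left _ hxS)

-- folding remove? over a list that avoids c skips a leading c
lemma fold_remove_none (u : List Char) :
    u.foldl (fun r? x => r?.bind (fun r => PySem.List.remove? r x)) (none : Option (List Char))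
      = none := by
  induction u with
  | nil => simp
  | cons a b ihb => simp [List.foldl, ihb]

lemma fold_remove_skip (u : List Char) (c : Char) (hc : ∀ x ∈ u, x ≠ c) :
    ∀ r : List Char,
    u.foldl (fun r? x => r?.bind (fun r => PySem.List.remove? r x)) (some (c :: r))
      = (u.foldl (fun r? x => r?.bind (fun r => PySem.List.remove? r x)) (some r)).map (c :: ·) := by
  induction u with
  | nil => intro r; simp
  | cons x t ih =>
      intro r
      have hx : x ≠ c := hc x (List.mem_cons_self)
      have ht : ∀ y ∈ t, y ≠ c := fun y hy => hc y (List.mem_cons_of_mem _ hy)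
      simp only [List.foldl, Option.bind_some]
      rw [PySem.List.remove?_cons_of_ne r (Ne.symm hx)]
      cases hrem : PySem.List.remove? r x with
      | none => simp [fold_remove_none]
      | some r' => simp only [Option.map_some]; exact ih ht r'

lemma b_fold (l : List Char) : ∀ S : List Char,
    (dedupS S l).foldl (fun r? c => r?.bind (fun r => PySem.List.remove? r c)) (some l)
      = some (dupsS S l) := by
  induction l with
  | nil => intro S; simp [dedupS, dupsS]
  | cons c t ih =>
      intro S
      by_cases h : c ∈ S
      · simp only [dedupS, dupsS, if_pos h]
        have hc : ∀ x ∈ dedupS S t, x ≠ c := by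
          intro x hx hxc
          exact not_mem_dedupS t S x hx (hxc ▸ h)
        rw [fold_remove_skip _ _ hc, ih S]
        simp
      · simp only [dedupS, dupsS, if_neg h, List.foldl, Option.bind_some,
          PySem.List.remove?_cons_self]
        exact ih (S ++ [c])

lemma dedup_is_dedupS (l : List Char) : PySem.List.dedup l = dedupS [] l := by
  have h := update_eq_dedupS l PySem.Set.empty
  rw [PySem.List.dedup_eq_ofList, ← PySem.Set.update_nil_left]
  simpa [PySem.Set.empty] using h

-- ===== VERDICT (by name: the statement is the Claim_ definition above) =====
theorem moveDups_spec : Claim_equal_moveDups := by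
  intro s _
  show moveDups s = moveDups_alt s
  simp only [moveDups, moveDups_alt]
  rw [dedup_is_dedupS, b_fold s.toList [],
    a_fold s.toList PySem.Set.empty [] []]
  simp [PySem.Set.empty]
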